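-- pv_equiv track=rewrite | github.com/NeckofNickey/algorithms | search/diplomas.py | get_min_square_for_diplomas
-- ===== SOURCE A (Python) =====
-- def get_min_square_for_diplomas(w, h, n):
--
--     left = 0
--     right = max(w, h) * n
--
--     while left < right:
--         mid = (left + right) // 2
--         if (mid // h) * (mid // w) >= n:
--             right = mid
--         else:
--             left = mid + 1
--
--     return left
-- ===== SOURCE B (Python) =====
-- def get_min_square_for_diplomas(w, h, n):
--     def diplomas_fit(side):
--         return (side // h) * (side // w) >= n
--
--     def search(lo, size):
--         if size <= 0:
--             return lo
--         half = size // 2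
--         if diplomas_fit(lo + half):
--             return search(lo, half)
--         return search(lo + half + 1, size - half - 1)
--
--     return search(0, max(w, h) * n)
-- ===== Notes on version B (the rewrite author's own statement) =====
-- stated objective: alternative
-- what changed: The iterative (left,right) while-loop bisection is rewritten as a recursive search over an (offset,size) window: the size is halved directly (half = size//2, probe lo+half) instead of recomputing mid = (left+right)//2, a different state representation and decomposition.
import Mathlib
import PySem

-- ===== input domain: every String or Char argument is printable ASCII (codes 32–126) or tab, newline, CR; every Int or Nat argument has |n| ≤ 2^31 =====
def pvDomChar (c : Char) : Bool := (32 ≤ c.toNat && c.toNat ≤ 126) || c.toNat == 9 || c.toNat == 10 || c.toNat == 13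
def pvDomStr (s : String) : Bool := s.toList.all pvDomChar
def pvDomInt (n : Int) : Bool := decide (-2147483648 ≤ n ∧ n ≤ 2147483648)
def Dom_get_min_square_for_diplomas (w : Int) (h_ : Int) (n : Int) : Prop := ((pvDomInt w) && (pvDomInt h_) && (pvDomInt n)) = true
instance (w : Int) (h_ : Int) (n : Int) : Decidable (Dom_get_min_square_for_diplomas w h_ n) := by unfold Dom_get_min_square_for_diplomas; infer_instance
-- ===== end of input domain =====

-- B replaces A's iterative (left,right) bisection loop by a recursive search over an
-- (offset, size) window that halves the size directly (same value; different decomposition).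


-- midpoint bounds, needed by port A's recursion for termination
theorem pv_mid_lt (left right : Int) (h : left < right) :
    PySem.Int.floordiv (left + right) 2 < right := by
  rw [PySem.Int.floordiv_lt_iff_lt_mul (a := left + right) (b := 2) (by omega)]
  omega

theorem pv_le_mid (left right : Int) (h : left < right) :
    left ≤ PySem.Int.floordiv (left + right) 2 :=
  (PySem.Int.floordiv_two_mid_bounds (by omega : left ≤ right)).1

-- half of a positive size is a strictly smaller nonnegative size (port B's termination)
theorem pv_half_bounds (size : Int) (h : 0 < size) :
    0 ≤ PySem.Int.floordiv size 2 ∧ PySem.Int.floordiv size 2 < size := by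
  constructor
  · rw [PySem.Int.le_floordiv_iff_mul_le (by omega : (0:Int) < 2)]; omega
  · rw [PySem.Int.floordiv_lt_iff_lt_mul (by omega : (0:Int) < 2)]; omega

-- ===== PORT A =====
-- the while-loop of A, state (left, right)
def pvLoopA (w : Int) (h_ : Int) (n : Int) (left : Int) (right : Int) : Int :=
  if h : left < right then
    let mid := PySem.Int.floordiv (left + right) 2
    if PySem.Int.floordiv mid h_ * PySem.Int.floordiv mid w ≥ n then
      pvLoopA w h_ n left mid
    else
      pvLoopA w h_ n (mid + 1) right
  else left
termination_by (right - left).toNat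
decreasing_by
  · have := pv_mid_lt left right h
    have := pv_le_mid left right h
    omega
  · have := pv_mid_lt left right h
    have := pv_le_mid left right h
    omega

def get_min_square_for_diplomas (w : Int) (h_ : Int) (n : Int) : Int :=
  pvLoopA w h_ n 0 (max w h_ * n)

-- ===== PORT B =====
-- B's feasibility test: do n diplomas fit in a side×side square?
def pvDiplomasFit (w : Int) (h_ : Int) (n : Int) (side : Int) : Bool :=
  decide (PySem.Int.floordiv side h_ * PySem.Int.floordiv side w ≥ n)

-- B's recursive search over a window given by its lower end and its size
def pvSearch (w : Int) (h_ : Int) (n : Int) (lo : Int) (size : Int) : Int :=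
  if hsz : size ≤ 0 then lo
  else
    let half := PySem.Int.floordiv size 2
    if pvDiplomasFit w h_ n (lo + half) then
      pvSearch w h_ n lo half
    else
      pvSearch w h_ n (lo + half + 1) (size - half - 1)
termination_by size.toNat
decreasing_by
  · have := pv_half_bounds size (by omega)
    omega
  · have := pv_half_bounds size (by omega)
    omega

def get_min_square_for_diplomas_alt (w : Int) (h_ : Int) (n : Int) : Int :=
  pvSearch w h_ n 0 (max w h_ * n)

-- ===== PRECONDITION & SPEC =====
-- Pre_ excludes exactly the inputs where A raises ZeroDivisionError:
-- w == 0 or h == 0 while the loop body runs at least once (max(w,h)*n > 0).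
def Pre_get_min_square_for_diplomas (w : Int) (h_ : Int) (n : Int) : Prop :=
  (w ≠ 0 ∧ h_ ≠ 0) ∨ max w h_ * n ≤ 0
instance (w : Int) (h_ : Int) (n : Int) : Decidable (Pre_get_min_square_for_diplomas w h_ n) := by unfold Pre_get_min_square_for_diplomas; infer_instance

def pvWitness_get_min_square_for_diplomas : Int × Int × Int := (2, 3, 10)

def Spec_get_min_square_for_diplomas (w : Int) (h_ : Int) (n : Int) (out : Int) : Prop := out = get_min_square_for_diplomas_alt w h_ n
instance (w : Int) (h_ : Int) (n : Int) (out : Int) : Decidable (Spec_get_min_square_for_diplomas w h_ n out) := by unfold Spec_get_min_square_for_diplomas; infer_instance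

-- ===== CLAIM (what is proved, stated in full; the proofs are below) =====
def Claim_equal_get_min_square_for_diplomas : Prop := ∀ (w : Int) (h_ : Int) (n : Int), Dom_get_min_square_for_diplomas w h_ n → Pre_get_min_square_for_diplomas w h_ n → Spec_get_min_square_for_diplomas w h_ n (get_min_square_for_diplomas w h_ n)

-- ===== LEMMAS AND PROOFS =====
-- midpoint of [left, right) equals left + half of the window size
theorem pv_mid_eq (left right : Int) :
    PySem.Int.floordiv (left + right) 2 = left + PySem.Int.floordiv (right - left) 2 := by
  have h := (PySem.Int.floordiv_eq_iff_of_pos (a := right - left) (b := 2)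
      (q := PySem.Int.floordiv (right - left) 2) (by omega)).mp rfl
  rw [PySem.Int.floordiv_eq_iff_of_pos (by omega : (0:Int) < 2)]
  omega

-- A's loop on (left, right) equals B's search on (left, right - left)
theorem pvLoopA_eq_pvSearch (w h_ n : Int) :
    ∀ (k : Nat) (left right : Int), (right - left).toNat ≤ k →
      pvLoopA w h_ n left right = pvSearch w h_ n left (right - left) := by
  intro k
  induction k with
  | zero =>
    intro left right hk
    rw [pvLoopA, pvSearch]
    have h1 : ¬ left < right := by omega
    have h2 : right - left ≤ 0 := by omega
    simp [h1, h2]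
  | succ k ih =>
    intro left right hk
    rw [pvLoopA, pvSearch]
    by_cases hlt : left < right
    · have hsz : ¬ right - left ≤ 0 := by omega
      have hmid := pv_mid_eq left right
      have hb := pv_half_bounds (right - left) (by omega)
      simp only [hlt, dif_pos, hsz, dif_neg, not_false_iff, ge_iff_le, pvDiplomasFit,
        decide_eq_true_eq, hmid]
      split
      · have := ih left (left + PySem.Int.floordiv (right - left) 2) (by omega)
        rw [this]; congr 1; omega
      · have := ih (left + PySem.Int.floordiv (right - left) 2 + 1) right (by omega)
        rw [this]; congr 1; omega
    · have h2 : right - left ≤ 0 := by omega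
      simp [hlt, h2]

-- ===== VERDICT (by name: the statement is the Claim_ definition above) =====
theorem get_min_square_for_diplomas_spec : Claim_equal_get_min_square_for_diplomas := by
  intro w h_ n _ _
  unfold Spec_get_min_square_for_diplomas get_min_square_for_diplomas get_min_square_for_diplomas_alt
  have := pvLoopA_eq_pvSearch w h_ n (max w h_ * n - 0).toNat 0 (max w h_ * n) le_rfl
  simpa using this
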